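-- pv_equiv track=rewrite | github.com/venkatmiriyala19/GeeksForGeeks | Remaining String.py | printString
-- ===== SOURCE A (Python) =====
-- def printString(S, ch, count):
--     c=1
--     if count==0:
--         return S
--     for i in range(len(S)):
--         if S[i] == ch:
--             if c==count and S[i+1:]!='':
--                 return S[i+1:]
--             c+=1
--     return 'Empty string'
-- ===== SOURCE B (Python) =====
-- def printString(S, ch, count):
--     if count == 0:
--         return S
--     positions = [i for i, x in enumerate(S) if x == ch]
--     if 1 <= count <= len(positions):
--         rest = S[positions[count - 1] + 1:]
--         if rest != '':
--             return rest
--     return 'Empty string'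
-- ===== Notes on version B (the rewrite author's own statement) =====
-- stated objective: simpler
-- what changed: B replaces A's counter-carrying scan with one pass collecting all match positions, then direct indexing of the count-th position and a single slice; no running counter or early-return loop.
import Mathlib
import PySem

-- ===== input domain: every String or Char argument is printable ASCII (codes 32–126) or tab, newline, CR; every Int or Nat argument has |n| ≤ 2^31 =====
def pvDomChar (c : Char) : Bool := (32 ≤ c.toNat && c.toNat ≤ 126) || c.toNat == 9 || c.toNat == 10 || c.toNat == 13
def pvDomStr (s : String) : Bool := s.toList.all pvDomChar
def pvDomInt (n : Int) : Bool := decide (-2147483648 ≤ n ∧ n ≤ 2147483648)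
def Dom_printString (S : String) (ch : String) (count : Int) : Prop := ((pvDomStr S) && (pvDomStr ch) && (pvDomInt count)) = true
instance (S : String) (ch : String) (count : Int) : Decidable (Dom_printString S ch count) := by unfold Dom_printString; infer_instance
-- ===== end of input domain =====

-- B replaces A's counter-carrying scan with one pass collecting all match positions,
-- then direct indexing of the count-th position and a single slice (objective: simpler).

-- ===== PORT A =====
-- the for-loop over range(len(S)): structural recursion over the remaining suffix,
-- carrying the counter c; S[i] is the head, S[i+1:] is the tail (i always in range).
def printStringLoopA (ch : List Char) (count : Int) : List Char → Int → String
  | [], _ => "Empty string"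
  | x :: rest, c =>
      if [x] = ch then
        if c = count ∧ rest ≠ [] then String.ofList rest
        else printStringLoopA ch count rest (c + 1)
      else printStringLoopA ch count rest c

def printString (S : String) (ch : String) (count : Int) : String :=
  if count = 0 then S
  else printStringLoopA ch.toList count S.toList 1

-- ===== PORT B =====
def printString_alt (S : String) (ch : String) (count : Int) : String :=
  if count = 0 then S
  else
    let l := S.toList
    -- [i for i, x in enumerate(S) if x == ch]
    let positions := ((PySem.List.enumerate l 0).filter (fun p => [p.2] = ch.toList)).map (·.1)
    if 1 ≤ count ∧ count ≤ (positions.length : Int) then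
      -- S[positions[count-1]+1:]  (index in range by the guard)
      let idx := positions.getD (count - 1).toNat 0
      let rest := PySem.List.slice l (some (idx + 1)) none
      if rest ≠ [] then String.ofList rest else "Empty string"
    else "Empty string"

-- ===== PRECONDITION & SPEC =====
def Spec_printString (S : String) (ch : String) (count : Int) (out : String) : Prop := out = printString_alt S ch count
instance (S : String) (ch : String) (count : Int) (out : String) : Decidable (Spec_printString S ch count out) := by unfold Spec_printString; infer_instance

-- ===== CLAIM (what is proved, stated in full; the proofs are below) =====
def Claim_equal_printString : Prop := ∀ (S : String) (ch : String) (count : Int), Dom_printString S ch count → Spec_printString S ch count (printString S ch count)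

-- ===== LEMMAS AND PROOFS =====

-- positions of matching chars, recursively (proof-side characterisation of B's comprehension)
def posOf (ch : List Char) : List Char → List Int
  | [] => []
  | x :: rest => if [x] = ch then 0 :: (posOf ch rest).map (· + 1) else (posOf ch rest).map (· + 1)

lemma posOf_nonneg (ch l : List Char) : ∀ i ∈ posOf ch l, 0 ≤ i := by
  induction l with
  | nil => simp [posOf]
  | cons x rest ih =>
      intro i hi
      simp only [posOf] at hi
      have H : ∀ j, j ∈ (posOf ch rest).map (· + 1) → 0 ≤ j := by
        intro j hj
        obtain ⟨k, hk, rfl⟩ := List.mem_map.1 hj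
        have := ih k hk; omega
      split at hi
      · rcases List.mem_cons.1 hi with rfl | h2
        · omega
        · exact H _ h2
      · exact H _ hi

lemma enumerate_shift (l : List Char) (s : Int) :
    PySem.List.enumerate l (s + 1) = (PySem.List.enumerate l s).map (fun p => (p.1 + 1, p.2)) := by
  induction l generalizing s with
  | nil => simp [PySem.List.enumerate_nil]
  | cons x rest ih => simp [PySem.List.enumerate_cons, ih]

lemma positions_eq_posOf (ch : List Char) (l : List Char) :
    ((PySem.List.enumerate l 0).filter (fun p => decide ([p.2] = ch))).map (·.1) = posOf ch l := by
  induction l with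
  | nil => simp [PySem.List.enumerate_nil, posOf]
  | cons x rest ih =>
      simp only [PySem.List.enumerate_cons, posOf]
      rw [show (0 : Int) + 1 = 0 + 1 from rfl, enumerate_shift rest 0]
      by_cases h : [x] = ch <;>
        simp [h, List.filter_map, List.map_map, Function.comp_def, ← ih]

-- drop past a position element
lemma drop_posOf_cons (ch : List Char) (x : Char) (rest : List Char) (j : Int)
    (hj : 0 ≤ j) :
    (x :: rest).drop ((j + 1 + 1).toNat) = rest.drop ((j + 1).toNat) := by
  have : (j + 1 + 1).toNat = (j + 1).toNat + 1 := by omega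
  simp [this]

-- the key invariant: A's loop computes what B computes from the position list
lemma loopA_eq (ch : List Char) (count : Int) (l : List Char) (c : Int) :
    printStringLoopA ch count l c =
      (if 1 ≤ count - c + 1 ∧ count - c + 1 ≤ ((posOf ch l).length : Int) ∧
          l.drop (((posOf ch l).getD (count - c).toNat 0 + 1).toNat) ≠ []
       then String.ofList (l.drop (((posOf ch l).getD (count - c).toNat 0 + 1).toNat))
       else "Empty string") := by
  induction l generalizing c with
  | nil => simp [printStringLoopA, posOf]
  | cons x rest ih =>
      simp only [printStringLoopA, posOf]
      by_cases hx : [x] = ch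
      · simp only [if_pos hx]
        by_cases hc : c = count
        · subst hc
          by_cases hr : rest ≠ []
          · simp [hr, List.getD]
          · push_neg at hr; subst hr
            simp [printStringLoopA, ih, posOf, List.getD]
        · rw [if_neg (by intro hcc; exact hc hcc.1), ih (c + 1)]
          by_cases hlt : count - c ≤ 0
          · have h1 : ¬ (1 ≤ count - c + 1 ∧ count - c + 1 ≤ ((0 :: (posOf ch rest).map (· + 1)).length : Int) ∧ (x :: rest).drop (((0 :: (posOf ch rest).map (· + 1)).getD (count - c).toNat 0 + 1).toNat) ≠ []) := by
              intro ⟨ha, _, hd⟩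
              have : count - c = 0 := by omega
              rw [this] at hd
              simp [List.getD] at hd
              exact hc (by omega)
            have h2 : ¬ (1 ≤ count - (c+1) + 1 ∧ count - (c+1) + 1 ≤ (((posOf ch rest)).length : Int) ∧ rest.drop ((((posOf ch rest)).getD (count - (c+1)).toNat 0 + 1).toNat) ≠ []) := by
              intro ⟨ha, _, _⟩; omega
            rw [if_neg h1, if_neg h2]
          · push_neg at hlt
            have hlen : ((0 :: (posOf ch rest).map (· + 1)).length : Int) = ((posOf ch rest).length : Int) + 1 := by simp
            by_cases hin : count - (c+1) + 1 ≤ ((posOf ch rest).length : Int)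
            · have hlt2 : (count - (c+1)).toNat < (posOf ch rest).length := by omega
              have hget : (0 :: (posOf ch rest).map (· + 1)).getD (count - c).toNat 0 =
                  (posOf ch rest).getD (count - (c+1)).toNat 0 + 1 := by
                have h1 : (count - c).toNat = (count - (c+1)).toNat + 1 := by omega
                rw [h1]
                simp [List.getD, List.getElem?_map, List.getElem?_eq_getElem hlt2]
              have hj : 0 ≤ (posOf ch rest).getD (count - (c+1)).toNat 0 := by
                exact posOf_nonneg ch rest ((posOf ch rest).getD (count - (c+1)).toNat 0)
                  (by rw [List.getD_eq_getElem _ _ hlt2]; exact List.getElem_mem _)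
              rw [hget, drop_posOf_cons ch x rest _ hj, hlen]
              by_cases hcond : 1 ≤ count - (c+1) + 1 ∧ count - (c+1) + 1 ≤ ((posOf ch rest).length : Int) ∧ rest.drop (((posOf ch rest).getD (count - (c+1)).toNat 0 + 1).toNat) ≠ []
              · rw [if_pos hcond, if_pos (show 1 ≤ count - c + 1 ∧ count - c + 1 ≤ ((posOf ch rest).length : Int) + 1 ∧ rest.drop (((posOf ch rest).getD (count - (c+1)).toNat 0 + 1).toNat) ≠ [] from ⟨by omega, by omega, hcond.2.2⟩)]
              · rw [if_neg hcond, if_neg (show ¬(1 ≤ count - c + 1 ∧ count - c + 1 ≤ ((posOf ch rest).length : Int) + 1 ∧ rest.drop (((posOf ch rest).getD (count - (c+1)).toNat 0 + 1).toNat) ≠ []) from fun h => hcond ⟨by omega, by omega, h.2.2⟩)]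
            · rw [hlen]
              rw [if_neg (by intro ⟨_, hb, _⟩; omega), if_neg (by intro ⟨_, hb, _⟩; omega)]
      · simp only [if_neg hx]
        rw [ih c]
        have hget : ∀ k : Nat, ((posOf ch rest).map (· + 1)).getD k 0 + 1 =
            ((posOf ch rest).getD k 0 + 1) + 1 ∨ ((posOf ch rest).length ≤ k) := by
          intro k
          by_cases hk : k < (posOf ch rest).length
          · left
            simp only [List.getD, List.getElem?_map]
            rcases h : (posOf ch rest)[k]? with _ | v
            · rw [List.getElem?_eq_none_iff] at h; omega
            · simp
          · right; omega
        have hlen : (((posOf ch rest).map (· + 1)).length : Int) = ((posOf ch rest).length : Int) := by simp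
        by_cases hin : 1 ≤ count - c + 1 ∧ count - c + 1 ≤ ((posOf ch rest).length : Int)
        · rcases hget (count - c).toNat with hg | hg
          · have hj : 0 ≤ (posOf ch rest).getD (count - c).toNat 0 := by
              have hlt2 : (count - c).toNat < (posOf ch rest).length := by omega
              exact posOf_nonneg ch rest _ (by rw [List.getD_eq_getElem _ _ hlt2]; exact List.getElem_mem _)
            rw [hg, hlen, drop_posOf_cons ch x rest _ hj]
          · exfalso; omega
        · rw [hlen, if_neg (by intro h; exact hin ⟨h.1, h.2.1⟩), if_neg (by intro h; exact hin ⟨h.1, h.2.1⟩)]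

-- ===== VERDICT (by name: the statement is the Claim_ definition above) =====
theorem printString_spec : Claim_equal_printString := by
  intro S ch count _
  unfold Spec_printString printString printString_alt
  by_cases h0 : count = 0
  · simp [h0]
  · simp only [if_neg h0]
    rw [loopA_eq]
    rw [show ((PySem.List.enumerate S.toList 0).filter (fun p => [p.2] = ch.toList)).map (·.1) =
        ((PySem.List.enumerate S.toList 0).filter (fun p => decide ([p.2] = ch.toList))).map (·.1) from rfl,
      positions_eq_posOf]
    have hc : count - 1 + 1 = count := by omega
    rw [hc]
    by_cases hin : 1 ≤ count ∧ count ≤ ((posOf ch.toList S.toList).length : Int)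
    · have hj : 0 ≤ (posOf ch.toList S.toList).getD (count - 1).toNat 0 := by
        have hlt2 : (count - 1).toNat < (posOf ch.toList S.toList).length := by omega
        exact posOf_nonneg _ _ _ (by rw [List.getD_eq_getElem _ _ hlt2]; exact List.getElem_mem _)
      have hslice : PySem.List.slice S.toList (some ((posOf ch.toList S.toList).getD (count - 1).toNat 0 + 1)) none =
          S.toList.drop (((posOf ch.toList S.toList).getD (count - 1).toNat 0 + 1).toNat) := by
        have : (posOf ch.toList S.toList).getD (count - 1).toNat 0 + 1 =
            ((((posOf ch.toList S.toList).getD (count - 1).toNat 0 + 1).toNat : Nat) : Int) := by omega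
        conv_lhs => rw [this]
        rw [PySem.List.slice_from_natCast]
      simp only [hslice, if_pos hin]
      by_cases hd : S.toList.drop (((posOf ch.toList S.toList).getD (count - 1).toNat 0 + 1).toNat) ≠ []
      · rw [if_pos ⟨hin.1, hin.2, hd⟩, if_pos hd]
      · rw [if_neg (by intro ⟨_, _, h⟩; exact hd h), if_neg hd]
    · rw [if_neg (by intro ⟨a,b,_⟩; exact hin ⟨a,b⟩), if_neg hin]
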